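-- pv_equiv track=rewrite | github.com/Duoquote/python-diskpart | main.py | lister
-- ===== SOURCE A (Python) =====
-- def lister(template, data):
-- 	lastVal = 0
-- 	totalLen = 0
-- 	partNum = 0
-- 	parts = {}
-- 	for i in template:
-- 		if i == "-":
-- 			if lastVal == 0:
-- 				parts[partNum] = {"begin": totalLen}
-- 			lastVal = 1
-- 		else:
-- 			if lastVal == 1:
-- 				parts[partNum]["end"] = totalLen
-- 				partNum += 1
-- 			lastVal = 0
-- 		totalLen +=1
-- 	parts[len(parts)-1]["end"] = totalLen
-- 	return parts
-- ===== SOURCE B (Python) =====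
-- def lister(template, data):
--     n = len(template)
--     runs = []
--     i = 0
--     while i < n:
--         if template[i] == "-":
--             j = i
--             while j < n and template[j] == "-":
--                 j += 1
--             runs.append((i, j))
--             i = j
--         else:
--             i += 1
--     parts = {k: {"begin": b, "end": e} for k, (b, e) in enumerate(runs)}
--     parts[len(parts) - 1]["end"] = n
--     return parts
-- ===== Notes on version B (the rewrite author's own statement) =====
-- stated objective: alternative
-- what changed: Replaces A's per-character lastVal/partNum state machine (which opens a part on a 0->dash transition and closes it on a dash->other transition) with a run-skipping index scan that collects each whole dash run as a (begin, end) pair in one inner step, then builds the parts dict in a single comprehension; the final overwrite of the last part's end (a quirk both programs share) is kept verbatim.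
import Mathlib
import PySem

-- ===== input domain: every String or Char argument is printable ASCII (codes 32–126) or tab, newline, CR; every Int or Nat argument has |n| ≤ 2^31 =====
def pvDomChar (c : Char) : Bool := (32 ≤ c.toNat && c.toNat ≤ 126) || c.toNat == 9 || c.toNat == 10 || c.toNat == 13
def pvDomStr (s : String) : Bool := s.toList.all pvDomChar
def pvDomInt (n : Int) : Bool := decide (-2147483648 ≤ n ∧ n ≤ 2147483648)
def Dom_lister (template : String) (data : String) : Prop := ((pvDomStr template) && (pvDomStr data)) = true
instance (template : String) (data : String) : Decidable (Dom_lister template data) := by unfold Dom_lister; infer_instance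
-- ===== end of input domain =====

-- B replaces A's per-character lastVal state machine by a run-skipping scan that collects whole dash runs
-- and builds the parts dict in one comprehension (objective: alternative decomposition, same cost).

-- ===== PORT A =====
-- the loop body of A's 'for i in template' (state: lastVal, totalLen, partNum, parts)
def listerBody (s : Int × Int × Int × PySem.Dict Int (PySem.Dict String Int)) (i : Char) :
    Int × Int × Int × PySem.Dict Int (PySem.Dict String Int) :=
  match s with
  | (lastVal, totalLen, partNum, parts) =>
    if i = '-' then
      let parts := if lastVal = 0 then parts.insert partNum (PySem.Dict.ofList [("begin", totalLen)]) else parts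
      (1, totalLen + 1, partNum, parts)
    else
      if lastVal = 1 then
        -- parts[partNum]["end"] = totalLen  (partNum is always present here in A's control flow)
        (0, totalLen + 1, partNum + 1, parts.modify partNum PySem.Dict.empty (fun d => d.insert "end" totalLen))
      else
        (0, totalLen + 1, partNum, parts)

-- the common last two source lines of A and B: parts[len(parts)-1]["end"] = totalLen; return parts
-- (under Pre_ the key len(parts)-1 is present, matching Python's parts[len(parts)-1])
def finishParts (parts : PySem.Dict Int (PySem.Dict String Int)) (totalLen : Int) :
    List (Int × List (String × Int)) :=
  ((parts.modify ((parts.size : Int) - 1) PySem.Dict.empty (fun d => d.insert "end" totalLen)).items).map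
    (fun kv => (kv.1, kv.2.items))

def lister (template : String) (data : String) : List (Int × List (String × Int)) :=
  let r := template.toList.foldl listerBody ((0 : Int), (0 : Int), (0 : Int), (PySem.Dict.empty : PySem.Dict Int (PySem.Dict String Int)))
  finishParts r.2.2.2 r.2.1

-- ===== PORT B =====
-- inner while: length of the dash run starting here ('while j < n and template[j] == "-": j += 1')
def dashRun : List Char → Nat
  | c :: cs => if c = '-' then dashRun cs + 1 else 0
  | [] => 0

-- outer while over the string, i the absolute index; on a dash, record (i, j) and jump to j
def runsB : List Char → Int → List (Int × Int)
  | [], _ => []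
  | c :: cs, i =>
    if c = '-' then
      (i, i + (dashRun (c :: cs) : Int)) :: runsB (List.drop (dashRun (c :: cs)) (c :: cs)) (i + (dashRun (c :: cs) : Int))
    else
      runsB cs (i + 1)
  termination_by cs => cs.length
  decreasing_by
  · have h1 : 1 ≤ dashRun (c :: cs) := by simp [dashRun, *]
    simp only [List.length_drop, List.length_cons]; omega
  · simp

def lister_alt (template : String) (data : String) : List (Int × List (String × Int)) :=
  let n := PySem.Str.len template
  let runs := runsB template.toList 0
  let parts := PySem.Dict.ofList
    ((PySem.List.enumerate runs 0).map (fun kbe => (kbe.1, PySem.Dict.ofList [("begin", kbe.2.1), ("end", kbe.2.2)])))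
  finishParts parts n

-- ===== PRECONDITION & SPEC =====
-- Pre_ excludes exactly the templates with no dash: there A's final line parts[len(parts)-1]
-- raises KeyError (parts is empty), and B raises the same KeyError on the same inputs.
def Pre_lister (template : String) (data : String) : Prop := '-' ∈ template.toList
instance (template : String) (data : String) : Decidable (Pre_lister template data) := by unfold Pre_lister; infer_instance
def pvWitness_lister : String × String := ("-ab--", "xy")

def Spec_lister (template : String) (data : String) (out : List (Int × List (String × Int))) : Prop := out = lister_alt template data
instance (template : String) (data : String) (out : List (Int × List (String × Int))) : Decidable (Spec_lister template data out) := by unfold Spec_lister; infer_instance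

-- ===== CLAIM (what is proved, stated in full; the proofs are below) =====
def Claim_equal_lister : Prop := ∀ (template : String) (data : String), Dom_lister template data → Pre_lister template data → Spec_lister template data (lister template data)

-- ===== LEMMAS AND PROOFS =====

-- run decomposition of a character list, as mutual structural recursion (spec-level bridge)
mutual
def runsM : List Char → Int → List (Int × Int)
  | [], _ => []
  | c :: cs, i => if c = '-' then extM cs i (i + 1) else runsM cs (i + 1)
def extM : List Char → Int → Int → List (Int × Int)
  | [], b, e => [(b, e)]
  | c :: cs, b, e => if c = '-' then extM cs b (e + 1) else (b, e) :: runsM cs (e + 1)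
end

-- the parts-list A's loop has built after a prefix (specO: a run is open, keyed p, begun at b)
mutual
def specP : List Char → Int → Int → List (Int × PySem.Dict String Int)
  | [], _, _ => []
  | c :: cs, t, p => if c = '-' then specO cs t (t + 1) p else specP cs (t + 1) p
def specO : List Char → Int → Int → Int → List (Int × PySem.Dict String Int)
  | [], b, _, p => [(p, PySem.Dict.mk [("begin", b)])]
  | c :: cs, b, e, p =>
    if c = '-' then specO cs b (e + 1) p
    else (p, PySem.Dict.mk [("begin", b), ("end", e)]) :: specP cs (e + 1) (p + 1)
end

-- entries B builds from a run list, keys p, p+1, …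
def entsP : Int → List (Int × Int) → List (Int × PySem.Dict String Int)
  | _, [] => []
  | p, be :: rs => (p, PySem.Dict.mk [("begin", be.1), ("end", be.2)]) :: entsP (p + 1) rs

-- the effect of the final line on the items list: set the last entry's "end" to T
def closeLast (T : Int) : List (Int × PySem.Dict String Int) → List (Int × PySem.Dict String Int)
  | [] => []
  | [kd] => [(kd.1, kd.2.insert "end" T)]
  | kd :: l => kd :: closeLast T l

lemma insert_end_open (b T : Int) :
    (PySem.Dict.mk [("begin", b)]).insert "end" T = PySem.Dict.mk [("begin", b), ("end", T)] := by
  simp [PySem.Dict.insert, PySem.Dict.contains]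

lemma insert_end_closed (b e T : Int) :
    (PySem.Dict.mk [("begin", b), ("end", e)]).insert "end" T = PySem.Dict.mk [("begin", b), ("end", T)] := by
  simp [PySem.Dict.insert, PySem.Dict.contains]

lemma ofList_pair (b e : Int) :
    PySem.Dict.ofList [(("begin" : String), b), ("end", e)] = PySem.Dict.mk [("begin", b), ("end", e)] := by
  simp [PySem.Dict.ofList, PySem.Dict.update, PySem.Dict.insert, PySem.Dict.contains, PySem.Dict.empty]

lemma extM_ne (cs : List Char) (b e : Int) : extM cs b e ≠ [] := by
  induction cs generalizing b e with
  | nil => simp [extM]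
  | cons c cs ih =>
    simp only [extM]
    split
    · exact ih _ _
    · simp

lemma runsM_ne (cs : List Char) (i : Int) (h : '-' ∈ cs) : runsM cs i ≠ [] := by
  induction cs generalizing i with
  | nil => cases h
  | cons c cs ih =>
    simp only [runsM]
    split
    · exact extM_ne _ _ _
    · rename_i hc
      have hmem : '-' ∈ cs := by
        rcases List.mem_cons.1 h with h1 | h1
        · exact absurd h1.symm hc
        · exact h1
      exact ih _ hmem

lemma extM_eq_dashRun (cs : List Char) (b e : Int) :
    extM cs b e = (b, e + (dashRun cs : Int)) :: runsM (cs.drop (dashRun cs)) (e + (dashRun cs : Int)) := by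
  induction cs generalizing b e with
  | nil => simp [extM, dashRun, runsM]
  | cons c cs ih =>
    by_cases hc : c = '-'
    · simp only [extM, dashRun, if_pos hc]
      rw [ih]
      have h1 : e + 1 + (dashRun cs : Int) = e + ((dashRun cs + 1 : Nat) : Int) := by push_cast; ring
      rw [List.drop_succ_cons, h1]
    · simp only [extM, dashRun, if_neg hc]
      have h2 : runsM (c :: cs) e = runsM cs (e + 1) := by simp [runsM, hc]
      simp [h2]

lemma runsB_eq_runsM (n : Nat) : ∀ (cs : List Char) (i : Int), cs.length ≤ n → runsB cs i = runsM cs i := by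
  induction n with
  | zero =>
    intro cs i hle
    have : cs = [] := List.length_eq_zero_iff.mp (Nat.le_zero.mp hle)
    subst this; simp [runsB, runsM]
  | succ n ih =>
    intro cs i hle
    match cs with
    | [] => simp [runsB, runsM]
    | c :: cs =>
      by_cases hc : c = '-'
      · rw [runsB, if_pos hc]
        have hdr : dashRun (c :: cs) = dashRun cs + 1 := by simp [dashRun, hc]
        rw [runsM, if_pos hc, extM_eq_dashRun]
        rw [hdr, List.drop_succ_cons]
        have hlen : (cs.drop (dashRun cs)).length ≤ n := by
          simp only [List.length_drop]
          simp only [List.length_cons] at hle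
          omega
        rw [ih _ _ hlen]
        have : i + ((dashRun cs + 1 : Nat) : Int) = i + 1 + (dashRun cs : Int) := by push_cast; ring
        rw [this]
      · rw [runsB, if_neg hc, runsM, if_neg hc]
        exact ih cs (i + 1) (by simp only [List.length_cons] at hle; omega)

lemma lenPO (cs : List Char) :
    (∀ t p, (specP cs t p).length = (runsM cs t).length) ∧
    (∀ b e p, (specO cs b e p).length = (extM cs b e).length) := by
  induction cs with
  | nil => exact ⟨fun t p => by simp [specP, runsM], fun b e p => by simp [specO, extM]⟩
  | cons c cs ih =>
    refine ⟨fun t p => ?_, fun b e p => ?_⟩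
    · by_cases hc : c = '-'
      · simp only [specP, runsM, if_pos hc]; exact ih.2 t (t + 1) p
      · simp only [specP, runsM, if_neg hc]; exact ih.1 (t + 1) p
    · by_cases hc : c = '-'
      · simp only [specO, extM, if_pos hc]; exact ih.2 b (e + 1) p
      · simp only [specO, extM, if_neg hc, List.length_cons]
        rw [ih.1 (e + 1) (p + 1)]

lemma entsP_length (rs : List (Int × Int)) (p : Int) : (entsP p rs).length = rs.length := by
  induction rs generalizing p with
  | nil => simp [entsP]
  | cons be rs ih => simp [entsP, ih]

lemma closeLast_cons_of_ne (T : Int) (kd : Int × PySem.Dict String Int)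
    (l : List (Int × PySem.Dict String Int)) (h : l ≠ []) :
    closeLast T (kd :: l) = kd :: closeLast T l := by
  cases l with
  | nil => exact absurd rfl h
  | cons y l' => simp [closeLast]

lemma closeLast_append (T : Int) (l : List (Int × PySem.Dict String Int)) (k : Int) (d : PySem.Dict String Int) :
    closeLast T (l ++ [(k, d)]) = l ++ [(k, d.insert "end" T)] := by
  induction l with
  | nil => simp [closeLast]
  | cons x l ih =>
    rw [List.cons_append, closeLast_cons_of_ne _ _ _ (by simp), ih]
    simp

lemma closeLast_map_fst (T : Int) (l : List (Int × PySem.Dict String Int)) :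
    (closeLast T l).map Prod.fst = l.map Prod.fst := by
  induction l with
  | nil => simp [closeLast]
  | cons x l ih =>
    cases l with
    | nil => simp [closeLast]
    | cons y l' =>
      rw [closeLast_cons_of_ne _ _ _ (by simp)]
      simp only [List.map_cons] at ih ⊢
      rw [ih]

def intKeys : Int → Nat → List Int
  | _, 0 => []
  | p, n + 1 => p :: intKeys (p + 1) n

lemma intKeys_length (n : Nat) : ∀ p, (intKeys p n).length = n := by
  induction n with
  | zero => intro p; simp [intKeys]
  | succ n ih => intro p; simp [intKeys, ih]

lemma intKeys_bound (n : Nat) : ∀ p, ∀ q ∈ intKeys p n, p ≤ q ∧ q < p + n := by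
  induction n with
  | zero => intro p q hq; simp [intKeys] at hq
  | succ n ih =>
    intro p q hq
    rcases List.mem_cons.1 hq with h | h
    · subst h; constructor <;> omega
    · have := ih (p + 1) q h
      push_cast
      omega

lemma intKeys_nodup (n : Nat) : ∀ p, (intKeys p n).Nodup := by
  induction n with
  | zero => intro p; simp [intKeys]
  | succ n ih =>
    intro p
    refine List.nodup_cons.2 ⟨?_, ih (p + 1)⟩
    intro hmem
    have := intKeys_bound n (p + 1) p hmem
    omega

lemma intKeys_succ (n : Nat) : ∀ p, intKeys p (n + 1) = intKeys p n ++ [p + n] := by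
  induction n with
  | zero => intro p; simp [intKeys]
  | succ n ih =>
    intro p
    show p :: intKeys (p + 1) (n + 1) = (p :: intKeys (p + 1) n) ++ [p + (n + 1 : Nat)]
    rw [ih (p + 1)]
    simp only [List.cons_append, List.cons.injEq, true_and, List.append_cancel_left_eq,
      List.cons.injEq, and_true]
    push_cast
    ring

lemma entsP_map_fst (rs : List (Int × Int)) (p : Int) :
    (entsP p rs).map Prod.fst = intKeys p rs.length := by
  induction rs generalizing p with
  | nil => simp [entsP, intKeys]
  | cons be rs ih =>
    simp only [entsP, List.map_cons, List.length_cons]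
    rw [ih]
    rfl

lemma closePC (cs : List Char) :
    (∀ t p T, closeLast T (specP cs t p) = closeLast T (entsP p (runsM cs t))) ∧
    (∀ b e p T, closeLast T (specO cs b e p) = closeLast T (entsP p (extM cs b e))) := by
  induction cs with
  | nil =>
    constructor
    · intro t p T; simp [specP, runsM, entsP]
    · intro b e p T
      simp [specO, extM, entsP, closeLast, insert_end_open, insert_end_closed]
  | cons c cs ih =>
    constructor
    · intro t p T
      by_cases hc : c = '-'
      · simp only [specP, runsM, if_pos hc]; exact ih.2 t (t + 1) p T
      · simp only [specP, runsM, if_neg hc]; exact ih.1 (t + 1) p T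
    · intro b e p T
      by_cases hc : c = '-'
      · simp only [specO, extM, if_pos hc]; exact ih.2 b (e + 1) p T
      · simp only [specO, extM, if_neg hc, entsP]
        rcases hsp : specP cs (e + 1) (p + 1) with _ | ⟨x, xs⟩
        · have hlen := (lenPO cs).1 (e + 1) (p + 1)
          rw [hsp] at hlen
          have hrm : runsM cs (e + 1) = [] := by
            have := hlen.symm; exact List.length_eq_zero_iff.mp (by simpa using this)
          rw [hrm]
          simp [entsP, closeLast]
        · have hlen := (lenPO cs).1 (e + 1) (p + 1)
          rw [hsp] at hlen
          rcases hen : entsP (p + 1) (runsM cs (e + 1)) with _ | ⟨y, ys⟩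
          · exfalso
            have h2 := entsP_length (runsM cs (e + 1)) (p + 1)
            rw [hen] at h2
            simp at hlen h2
            omega
          · have h3 := ih.1 (e + 1) (p + 1) T
            rw [hsp, hen] at h3
            rw [closeLast_cons_of_ne T _ (x :: xs) (by simp), h3,
              ← closeLast_cons_of_ne T _ (y :: ys) (by simp)]

lemma modLast (pre : List (Int × PySem.Dict String Int)) (k : Int) (v : PySem.Dict String Int)
    (dflt : PySem.Dict String Int) (f : PySem.Dict String Int → PySem.Dict String Int)
    (h : ∀ q ∈ pre, (q.1 == k) = false) :
    ((PySem.Dict.mk (pre ++ [(k, v)])).modify k dflt f).items = pre ++ [(k, f v)] := by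
  have h1 : List.find? (fun q => q.1 == k) pre = none :=
    List.find?_eq_none.mpr (by intro q hq; simp [h q hq])
  have hfind : List.find? (fun q => q.1 == k) (pre ++ [(k, v)]) = some (k, v) := by
    rw [List.find?_append, h1]
    simp [List.find?]
  have hcont : (PySem.Dict.mk (pre ++ [(k, v)])).contains k = true := by
    simp [PySem.Dict.contains, List.any_append]
  unfold PySem.Dict.modify
  have hgd : (PySem.Dict.mk (pre ++ [(k, v)])).getD k dflt = v := by
    simp [PySem.Dict.getD, PySem.Dict.get?, hfind]
  rw [hgd, PySem.Dict.items_insert_of_contains _ _ hcont]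
  show List.map _ (pre ++ [(k, v)]) = _
  rw [List.map_append]
  congr 1
  · conv_rhs => rw [← List.map_id pre]
    apply List.map_congr_left
    intro q hq
    simp [h q hq]
  · simp

lemma finalize (l : List (Int × PySem.Dict String Int)) (T : Int) (hne : l ≠ [])
    (hkeys : l.map Prod.fst = intKeys 0 l.length) :
    ((PySem.Dict.mk l).modify ((l.length : Int) - 1) PySem.Dict.empty (fun d => d.insert "end" T)).items
      = closeLast T l := by
  obtain ⟨init, kd, rfl⟩ : ∃ init kd, l = init ++ [kd] := by
    rcases List.eq_nil_or_concat l with h | ⟨L, b, h⟩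
    · exact absurd h hne
    · exact ⟨L, b, by simp [h]⟩
  obtain ⟨k, d⟩ := kd
  have hlen : (init ++ [(k, d)]).length = init.length + 1 := by simp
  rw [hlen, intKeys_succ, List.map_append] at hkeys
  have hlen1 : (init.map Prod.fst).length = (intKeys 0 init.length).length := by
    simp [intKeys_length]
  obtain ⟨hinit, hk⟩ := List.append_inj hkeys hlen1
  have hkval : k = (init.length : Int) := by
    simpa using hk
  have hkey : ((init ++ [(k, d)]).length : Int) - 1 = k := by
    rw [hlen, hkval]; push_cast; ring
  have hne' : ∀ q ∈ init, (q.1 == k) = false := by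
    intro q hq
    have hmem : q.1 ∈ init.map Prod.fst := List.mem_map_of_mem hq
    rw [hinit] at hmem
    have hb := intKeys_bound init.length 0 q.1 hmem
    rw [beq_eq_false_iff_ne, hkval]
    omega
  rw [hkey, modLast init k d _ _ hne', closeLast_append]

lemma lemA (cs : List Char) :
    (∀ (t p : Int) (parts : PySem.Dict Int (PySem.Dict String Int)),
        (∀ q ∈ parts.items, q.1 < p) →
        (cs.foldl listerBody (0, t, p, parts)).2.1 = t + cs.length ∧
        (cs.foldl listerBody (0, t, p, parts)).2.2.2.items = parts.items ++ specP cs t p) ∧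
    (∀ (b e p : Int) (l : List (Int × PySem.Dict String Int)),
        (∀ q ∈ l, q.1 < p) →
        (cs.foldl listerBody (1, e, p, PySem.Dict.mk (l ++ [(p, PySem.Dict.mk [("begin", b)])]))).2.1 = e + cs.length ∧
        (cs.foldl listerBody (1, e, p, PySem.Dict.mk (l ++ [(p, PySem.Dict.mk [("begin", b)])]))).2.2.2.items
          = l ++ specO cs b e p) := by
  induction cs with
  | nil =>
    constructor
    · intro t p parts hk
      refine ⟨by simp, ?_⟩
      simp [specP]
    · intro b e p l hk
      refine ⟨by simp, ?_⟩
      simp [specO]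
  | cons c cs ih =>
    constructor
    · intro t p parts hk
      by_cases hc : c = '-'
      · have hcont : parts.contains p = false := by
          rw [Bool.eq_false_iff]
          intro hcc
          rw [PySem.Dict.contains_iff_mem_keys] at hcc
          simp only [PySem.Dict.keys] at hcc
          obtain ⟨q, hq, hq1⟩ := List.mem_map.1 hcc
          have := hk q hq
          omega
        have hstep : listerBody (0, t, p, parts) c
            = (1, t + 1, p, parts.insert p (PySem.Dict.ofList [("begin", t)])) := by
          simp [listerBody, hc]
        have hdict : parts.insert p (PySem.Dict.ofList [("begin", t)])
            = PySem.Dict.mk (parts.items ++ [(p, PySem.Dict.mk [("begin", t)])]) := by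
          apply PySem.Dict.ext
          rw [PySem.Dict.items_insert_of_not_contains _ _ hcont]
          rfl
        rw [List.foldl_cons, hstep, hdict]
        have h2 := ih.2 t (t + 1) p parts.items hk
        refine ⟨by rw [h2.1]; push_cast [List.length_cons]; omega, ?_⟩
        rw [h2.2]
        simp [specP, hc]
      · have hstep : listerBody (0, t, p, parts) c = (0, t + 1, p, parts) := by
          simp [listerBody, hc]
        rw [List.foldl_cons, hstep]
        have h2 := ih.1 (t + 1) p parts hk
        exact ⟨by rw [h2.1]; push_cast [List.length_cons]; omega, by rw [h2.2]; simp [specP, hc]⟩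
    · intro b e p l hk
      by_cases hc : c = '-'
      · have hstep : listerBody (1, e, p, PySem.Dict.mk (l ++ [(p, PySem.Dict.mk [("begin", b)])])) c
            = (1, e + 1, p, PySem.Dict.mk (l ++ [(p, PySem.Dict.mk [("begin", b)])])) := by
          simp [listerBody, hc]
        rw [List.foldl_cons, hstep]
        have h2 := ih.2 b (e + 1) p l hk
        exact ⟨by rw [h2.1]; push_cast [List.length_cons]; omega, by rw [h2.2]; simp [specO, hc]⟩
      · have hstep : listerBody (1, e, p, PySem.Dict.mk (l ++ [(p, PySem.Dict.mk [("begin", b)])])) c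
            = (0, e + 1, p + 1,
               (PySem.Dict.mk (l ++ [(p, PySem.Dict.mk [("begin", b)])])).modify p PySem.Dict.empty
                 (fun d => d.insert "end" e)) := by
          simp [listerBody, hc]
        have hne' : ∀ q ∈ l, (q.1 == p) = false := by
          intro q hq
          rw [beq_eq_false_iff_ne]
          have := hk q hq
          omega
        have hmod : (PySem.Dict.mk (l ++ [(p, PySem.Dict.mk [("begin", b)])])).modify p PySem.Dict.empty
              (fun d => d.insert "end" e)
            = PySem.Dict.mk (l ++ [(p, PySem.Dict.mk [("begin", b), ("end", e)])]) := by
          apply PySem.Dict.ext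
          rw [modLast l p _ _ _ hne']
          rw [insert_end_open]
        rw [List.foldl_cons, hstep, hmod]
        have hk2 : ∀ q ∈ l ++ [(p, PySem.Dict.mk [("begin", b), ("end", e)])], q.1 < p + 1 := by
          intro q hq
          rcases List.mem_append.1 hq with hq1 | hq1
          · have := hk q hq1; omega
          · rw [List.mem_singleton] at hq1
            rw [hq1]
            exact lt_add_one p
        have h2 := ih.1 (e + 1) (p + 1) (PySem.Dict.mk (l ++ [(p, PySem.Dict.mk [("begin", b), ("end", e)])])) hk2
        refine ⟨by rw [h2.1]; push_cast [List.length_cons]; omega, ?_⟩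
        rw [h2.2]
        show (l ++ [(p, PySem.Dict.mk [("begin", b), ("end", e)])]) ++ specP cs (e + 1) (p + 1) = _
        rw [List.append_assoc]
        simp [specO, hc]

lemma entsB (rs : List (Int × Int)) (p : Int) :
    (PySem.List.enumerate rs p).map (fun kbe => (kbe.1, PySem.Dict.ofList [(("begin" : String), kbe.2.1), ("end", kbe.2.2)]))
      = entsP p rs := by
  induction rs generalizing p with
  | nil => simp [PySem.List.enumerate_nil, entsP]
  | cons be rs ih =>
    rw [PySem.List.enumerate_cons]
    simp only [List.map_cons]
    rw [ih]
    simp [entsP, ofList_pair]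

lemma foldl_insert_fresh (l : List (Int × PySem.Dict String Int)) :
    ∀ (d : PySem.Dict Int (PySem.Dict String Int)),
      (∀ q ∈ l, d.contains q.1 = false) → (l.map Prod.fst).Nodup →
      (List.foldl (fun acc p => acc.insert p.1 p.2) d l).items = d.items ++ l := by
  induction l with
  | nil => intro d _ _; simp
  | cons q l ih =>
    intro d h hnd
    simp only [List.foldl_cons]
    have hc := h q (List.mem_cons_self)
    have hfresh : ∀ r ∈ l, (d.insert q.1 q.2).contains r.1 = false := by
      intro r hr
      rw [PySem.Dict.contains_insert]
      have h1 : (r.1 == q.1) = false := by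
        rw [beq_eq_false_iff_ne]
        intro heq
        have : q.1 ∈ l.map Prod.fst := heq ▸ List.mem_map_of_mem hr
        simp only [List.map_cons, List.nodup_cons] at hnd
        exact hnd.1 this
      rw [h1, h r (List.mem_cons_of_mem _ hr)]
      rfl
    rw [ih (d.insert q.1 q.2) hfresh (by simp only [List.map_cons, List.nodup_cons] at hnd; exact hnd.2)]
    rw [PySem.Dict.items_insert_of_not_contains _ _ hc]
    simp

lemma ofList_items_of_nodup (l : List (Int × PySem.Dict String Int)) (h : (l.map Prod.fst).Nodup) :
    (PySem.Dict.ofList l).items = l := by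
  show (List.foldl (fun acc p => acc.insert p.1 p.2) PySem.Dict.empty l).items = l
  rw [foldl_insert_fresh l PySem.Dict.empty (fun q _ => rfl) h]
  rfl

-- ===== VERDICT (by name: the statement is the Claim_ definition above) =====
theorem lister_spec : Claim_equal_lister := by
  intro template data _hd hpre
  unfold Spec_lister
  have hpre' : '-' ∈ template.toList := hpre
  obtain ⟨hT, hI⟩ := (lemA template.toList).1 0 0 PySem.Dict.empty
    (by intro q hq; simp [PySem.Dict.empty] at hq)
  have hdA : (template.toList.foldl listerBody
        ((0 : Int), (0 : Int), (0 : Int), (PySem.Dict.empty : PySem.Dict Int (PySem.Dict String Int)))).2.2.2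
      = PySem.Dict.mk (specP template.toList 0 0) := by
    apply PySem.Dict.ext
    rw [hI]
    simp [PySem.Dict.empty]
  have hT' : (template.toList.foldl listerBody
        ((0 : Int), (0 : Int), (0 : Int), (PySem.Dict.empty : PySem.Dict Int (PySem.Dict String Int)))).2.1
      = (template.toList.length : Int) := by
    rw [hT]; ring
  have hrB : runsB template.toList 0 = runsM template.toList 0 :=
    runsB_eq_runsM template.toList.length template.toList 0 le_rfl
  have hmne : runsM template.toList 0 ≠ [] := runsM_ne _ _ hpre'
  have hnodB : ((entsP 0 (runsM template.toList 0)).map Prod.fst).Nodup := by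
    rw [entsP_map_fst]; exact intKeys_nodup _ 0
  have hdB : PySem.Dict.ofList ((PySem.List.enumerate (runsB template.toList 0) 0).map
        (fun kbe => (kbe.1, PySem.Dict.ofList [(("begin" : String), kbe.2.1), ("end", kbe.2.2)])))
      = PySem.Dict.mk (entsP 0 (runsM template.toList 0)) := by
    rw [hrB, entsB]
    apply PySem.Dict.ext
    rw [ofList_items_of_nodup _ hnodB]
  have hkeq : (specP template.toList 0 0).map Prod.fst
      = (entsP 0 (runsM template.toList 0)).map Prod.fst := by
    have h0 := (closePC template.toList).1 0 0 0
    have h1 := congrArg (List.map Prod.fst) h0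
    rwa [closeLast_map_fst, closeLast_map_fst] at h1
  have hlenA : (specP template.toList 0 0).length = (entsP 0 (runsM template.toList 0)).length := by
    have := congrArg List.length hkeq; simpa using this
  have hkeysB : (entsP 0 (runsM template.toList 0)).map Prod.fst
      = intKeys 0 (entsP 0 (runsM template.toList 0)).length := by
    rw [entsP_map_fst, entsP_length]
  have hkeysA : (specP template.toList 0 0).map Prod.fst
      = intKeys 0 (specP template.toList 0 0).length := by
    rw [hkeq, hkeysB, hlenA]
  have hneB : entsP 0 (runsM template.toList 0) ≠ [] := by
    intro h0
    have h1 := entsP_length (runsM template.toList 0) 0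
    rw [h0] at h1
    exact hmne (List.length_eq_zero_iff.mp h1.symm)
  have hneA : specP template.toList 0 0 ≠ [] := by
    intro h0; rw [h0] at hlenA
    exact hneB (List.length_eq_zero_iff.mp hlenA.symm)
  show lister template data = lister_alt template data
  simp only [lister, lister_alt]
  rw [hdA, hT', hdB, PySem.Str.len_eq]
  unfold finishParts
  simp only [PySem.Dict.size]
  rw [finalize (specP template.toList 0 0) (template.toList.length : Int) hneA hkeysA,
    finalize (entsP 0 (runsM template.toList 0)) (template.toList.length : Int) hneB hkeysB,
    (closePC template.toList).1 0 0 (template.toList.length : Int)]
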